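-- pv_equiv track=rewrite | github.com/innewiadro/Codewars | kata_level7/Simple_fun_#50_array_conversion/Simple_fun_#50_array_conversion.py | array_conversion
-- ===== SOURCE A (Python) =====
-- def array_conversion(arr):
--     iteration = 1
--
--     while len(arr) > 1:
--         new_arr = []
--
--         for i in range(0, len(arr), 2):
--             a, b = arr[i], arr[i + 1]
--             if iteration % 2 == 1:
--                 new_arr.append(a + b)
--             else:
--                 new_arr.append(a * b)
--
--         arr = new_arr
--         iteration += 1
--
--     return arr[0]
-- ===== SOURCE B (Python) =====
-- def _reduce(arr, iteration):
--     if len(arr) <= 1: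
--         return arr[0]
--     it = iter(arr)
--     if iteration % 2 == 1:
--         nxt = [a + b for a, b in zip(it, it)]
--     else:
--         nxt = [a * b for a, b in zip(it, it)]
--     return _reduce(nxt, iteration + 1)
--
--
-- def array_conversion(arr):
--     return _reduce(arr, 1)
-- ===== Notes on version B (the rewrite author's own statement) =====
-- stated objective: alternative
-- what changed: Replaced the index-driven while/for loops that rebuild new_arr with a recursive reduction that pairs adjacent elements by zipping an iterator with itself.
import Mathlib
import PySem

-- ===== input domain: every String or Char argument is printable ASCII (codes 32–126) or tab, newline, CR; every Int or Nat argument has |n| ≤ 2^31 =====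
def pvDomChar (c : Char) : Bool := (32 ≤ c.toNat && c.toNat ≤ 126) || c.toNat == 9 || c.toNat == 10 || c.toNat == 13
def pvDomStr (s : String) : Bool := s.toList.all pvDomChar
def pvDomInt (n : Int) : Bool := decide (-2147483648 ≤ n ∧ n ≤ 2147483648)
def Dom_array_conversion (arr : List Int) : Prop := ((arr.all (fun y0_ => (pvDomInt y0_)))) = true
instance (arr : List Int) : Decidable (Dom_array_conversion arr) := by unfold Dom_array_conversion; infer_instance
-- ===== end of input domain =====

-- B replaces A's index-driven while/for loops with a recursive reduction pairing adjacent
-- elements via an iterator-zip (same cost; a different decomposition).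

-- ===== PORT A =====
-- inner 'for i in range(0, len(arr), 2)' loop: builds new_arr; none = IndexError from arr[i+1]
def pvPassA (iteration : Int) (arr : List Int) (i : Nat) : Option (List Int) :=
  if i < arr.length then
    match PySem.List.pyGet? arr (i : Int), PySem.List.pyGet? arr ((i : Int) + 1) with
    | some a, some b =>
      match pvPassA iteration arr (i + 2) with
      | some rest =>
        some ((if PySem.Int.mod iteration 2 = 1 then a + b else a * b) :: rest)
      | none => none
    | _, _ => none
  else some []
termination_by arr.length - i

-- termination lemma for the outer while loop (cited in decreasing_by)
theorem pvPassA_length_le (n : Nat) : ∀ (it : Int) (arr : List Int) (i : Nat) (l : List Int),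
    arr.length - i ≤ n → pvPassA it arr i = some l → 2 * l.length ≤ arr.length - i + 1 := by
  induction n with
  | zero =>
    intro it arr i l hn h
    rw [pvPassA] at h
    rw [if_neg (by omega : ¬ i < arr.length)] at h
    injection h with h
    subst h
    simp
  | succ n ih =>
    intro it arr i l hn h
    rw [pvPassA] at h
    by_cases hi : i < arr.length
    · rw [if_pos hi] at h
      split at h
      · split at h
        · rename_i rest heq
          injection h with h
          subst h
          have := ih it arr (i + 2) rest (by omega) heq
          simp
          omega
        · simp at h
      · simp at h
    · rw [if_neg hi] at h
      injection h with h
      subst h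
      simp

-- outer 'while len(arr) > 1' loop
def pvLoopA (arr : List Int) (iteration : Int) : Option Int :=
  if _h : 1 < arr.length then
    match h2 : pvPassA iteration arr 0 with
    | some new_arr => pvLoopA new_arr (iteration + 1)
    | none => none
  else
    PySem.List.pyGet? arr 0
termination_by arr.length
decreasing_by
  have := pvPassA_length_le arr.length iteration arr 0 new_arr (by omega) h2
  omega

def array_conversion (arr : List Int) : Int := (pvLoopA arr 1).getD 0

-- ===== PORT B =====
-- zip(it, it) on an iterator of arr: adjacent pairs, odd leftover dropped
def pvPairs : List Int → List (Int × Int)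
  | a :: b :: rest => (a, b) :: pvPairs rest
  | _ => []

theorem pvPairs_length (l : List Int) : (pvPairs l).length = l.length / 2 := by
  induction l using pvPairs.induct with
  | case1 a b rest ih => simp [pvPairs, ih]; omega
  | case2 l h => cases l with
    | nil => simp [pvPairs]
    | cons a t => cases t with
      | nil => simp [pvPairs]
      | cons b r => exact absurd rfl (h a b r)

-- _reduce(arr, iteration); none = IndexError from arr[0] on the empty list
def pvReduceB (arr : List Int) (iteration : Int) : Option Int :=
  if _h : arr.length ≤ 1 then
    PySem.List.pyGet? arr 0
  else
    pvReduceB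
      (if PySem.Int.mod iteration 2 = 1
        then (pvPairs arr).map (fun p => p.1 + p.2)
        else (pvPairs arr).map (fun p => p.1 * p.2))
      (iteration + 1)
termination_by arr.length
decreasing_by
  have := pvPairs_length arr
  split <;> simp <;> omega

def array_conversion_alt (arr : List Int) : Int := (pvReduceB arr 1).getD 0

-- ===== PRECONDITION & SPEC =====
-- Pre_ admits exactly the inputs where A returns: the length must be a power of two
-- (on any other nonempty length some level is odd and arr[i+1] raises IndexError; on [] arr[0] raises).
def Pre_array_conversion (arr : List Int) : Prop := ∃ k < arr.length + 1, arr.length = 2 ^ k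
instance (arr : List Int) : Decidable (Pre_array_conversion arr) := by unfold Pre_array_conversion; infer_instance
def pvWitness_array_conversion : List Int := ([1, 2, 3, 4] : List Int)

def Spec_array_conversion (arr : List Int) (out : Int) : Prop := out = array_conversion_alt arr
instance (arr : List Int) (out : Int) : Decidable (Spec_array_conversion arr out) := by unfold Spec_array_conversion; infer_instance

-- ===== CLAIM (what is proved, stated in full; the proofs are below) =====
def Claim_equal_array_conversion : Prop := ∀ (arr : List Int), Dom_array_conversion arr → Pre_array_conversion arr → Spec_array_conversion arr (array_conversion arr)
-- ===== LEMMAS AND PROOFS =====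

-- shifting the index-based pass past two consumed elements
theorem pvPassA_shift (n : Nat) : ∀ (it a b : Int) (rest : List Int) (i : Nat),
    rest.length - i ≤ n → pvPassA it (a :: b :: rest) (i + 2) = pvPassA it rest i := by
  induction n with
  | zero =>
    intro it a b rest i hn
    conv_lhs => rw [pvPassA]
    conv_rhs => rw [pvPassA]
    rw [if_neg (by simp; omega : ¬ i + 2 < (a :: b :: rest).length),
        if_neg (by omega : ¬ i < rest.length)]
  | succ n ih =>
    intro it a b rest i hn
    conv_lhs => rw [pvPassA]
    conv_rhs => rw [pvPassA]
    by_cases hi : i < rest.length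
    · have h1 : i + 2 < (a :: b :: rest).length := by simp; omega
      have e1 : PySem.List.pyGet? (a :: b :: rest) (((i + 2 : Nat) : Int)) = PySem.List.pyGet? rest (i : Int) := by
        rw [PySem.List.pyGet?_natCast, PySem.List.pyGet?_natCast]
        rw [show i + 2 = (i + 1) + 1 from by omega]
        simp
      have e2 : PySem.List.pyGet? (a :: b :: rest) ((((i + 2 : Nat) : Int)) + 1) = PySem.List.pyGet? rest ((i : Int) + 1) := by
        rw [show (((i + 2 : Nat) : Int)) + 1 = ((i + 3 : Nat) : Int) from by push_cast; ring,
            show ((i : Int) + 1) = ((i + 1 : Nat) : Int) from by push_cast; ring]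
        rw [PySem.List.pyGet?_natCast, PySem.List.pyGet?_natCast]
        rw [show i + 3 = ((i + 1) + 1) + 1 from by omega]
        simp
      have e3 : pvPassA it (a :: b :: rest) ((i + 2) + 2) = pvPassA it rest (i + 2) :=
        ih it a b rest (i + 2) (by omega)
      rw [if_pos h1, if_pos hi, e1, e2, e3]
    · rw [if_neg (by simp; omega : ¬ i + 2 < (a :: b :: rest).length), if_neg hi]

-- on an even-length level the index pass is the pair map
theorem pvPassA_even (arr : List Int) : ∀ (it : Int), arr.length % 2 = 0 →
    pvPassA it arr 0 = some ((pvPairs arr).map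
      (fun p => if PySem.Int.mod it 2 = 1 then p.1 + p.2 else p.1 * p.2)) := by
  induction arr using pvPairs.induct with
  | case1 a b rest ih =>
    intro it hev
    conv_lhs => rw [pvPassA]
    have h0 : (0 : Nat) < (a :: b :: rest).length := by simp
    have e1 : PySem.List.pyGet? (a :: b :: rest) (((0 : Nat) : Int)) = some a := by simp
    have e2 : PySem.List.pyGet? (a :: b :: rest) ((((0 : Nat) : Int)) + 1) = some b := by
      rw [show (((0 : Nat) : Int)) + 1 = ((1 : Nat) : Int) from by norm_num]
      rw [PySem.List.pyGet?_natCast]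
      simp
    have hsh : pvPassA it (a :: b :: rest) (0 + 2) = pvPassA it rest 0 :=
      pvPassA_shift rest.length it a b rest 0 (by omega)
    have hr : pvPassA it rest 0 = some ((pvPairs rest).map
        (fun p => if PySem.Int.mod it 2 = 1 then p.1 + p.2 else p.1 * p.2)) := by
      apply ih
      simp at hev
      omega
    rw [if_pos h0, e1, e2, hsh, hr]
    simp [pvPairs]
  | case2 l h =>
    intro it hev
    cases l with
    | nil => rw [pvPassA]; simp [pvPairs]
    | cons a t => cases t with
      | nil => simp at hev
      | cons b r => exact absurd rfl (h a b r)

-- main loop correspondence on power-of-two lengths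
theorem pvLoop_eq (k : Nat) : ∀ (arr : List Int) (it : Int), arr.length = 2 ^ k →
    pvLoopA arr it = pvReduceB arr it := by
  induction k with
  | zero =>
    intro arr it hlen
    rw [pvLoopA, pvReduceB]
    simp at hlen
    simp [hlen]
  | succ k ih =>
    intro arr it hlen
    have hp : 0 < 2 ^ k := pow_pos (by omega : (0 : Nat) < 2) k
    have hps : arr.length = 2 * 2 ^ k := by rw [hlen]; ring
    have h2 : 1 < arr.length := by omega
    have hev : arr.length % 2 = 0 := by omega
    have hnle : ¬ arr.length ≤ 1 := by omega
    have hpass := pvPassA_even arr it hev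
    have hmap : ((pvPairs arr).map
        (fun p => if PySem.Int.mod it 2 = 1 then p.1 + p.2 else p.1 * p.2)) =
        (if PySem.Int.mod it 2 = 1
          then (pvPairs arr).map (fun p => p.1 + p.2)
          else (pvPairs arr).map (fun p => p.1 * p.2)) := by
      by_cases hc : PySem.Int.mod it 2 = 1
      · rw [if_pos hc]; simp only [if_pos hc]
      · rw [if_neg hc]; simp only [if_neg hc]
    have hlen' : ((pvPairs arr).map
        (fun p => if PySem.Int.mod it 2 = 1 then p.1 + p.2 else p.1 * p.2)).length = 2 ^ k := by
      simp [pvPairs_length]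
      omega
    conv_lhs => rw [pvLoopA]
    rw [dif_pos h2]
    split
    · rename_i new_arr heq
      rw [hpass] at heq
      injection heq with heq
      conv_rhs => rw [pvReduceB]
      rw [dif_neg hnle, ← hmap, heq]
      exact ih new_arr (it + 1) (heq ▸ hlen')
    · rename_i heq
      rw [hpass] at heq
      simp at heq

-- ===== VERDICT (by name: the statement is the Claim_ definition above) =====
theorem array_conversion_spec : Claim_equal_array_conversion := by
  intro arr _ hpre
  rcases hpre with ⟨k, _, hlen⟩
  unfold Spec_array_conversion array_conversion array_conversion_alt
  rw [pvLoop_eq k arr 1 hlen]
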